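-- pv_equiv track=rewrite | github.com/riyer98/Numerical-Methods | ph2140/pyass1_ph16b007.py | Ncow
-- ===== SOURCE A (Python) =====
-- def Ncow(n):
--     (a,b,c)=(1,1,1)
--     result=[1,1,1]
--     for i in range(3,n):
--         (a,b,c)=(b,c,c+a)
--         result.append(c)
--         i=i+1
--     return result
-- ===== SOURCE B (Python) =====
-- def Ncow(n):
--     # Telescoping the recurrence x[i] = x[i-1] + x[i-3] gives
--     # x[i] = 1 + (x[0] + ... + x[i-3]); grow the list from that identity,
--     # keeping a running prefix sum with a lag-3 read pointer.
--     result = [1, 1, 1]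
--     total = 0
--     j = 0
--     while len(result) < n:
--         total += result[j]
--         j += 1
--         result.append(1 + total)
--     return result
-- ===== Notes on version B (the rewrite author's own statement) =====
-- stated objective: alternative
-- what changed: Replaces the order-3 recurrence x[i]=x[i-1]+x[i-3] held in a rolling (a,b,c) scalar triple with the telescoped identity x[i] = 1 + (x[0]+...+x[i-3]): B maintains a running prefix sum and a lag-3 read pointer into the output list and appends 1+total each step, never forming x[i-1]+x[i-3].
import Mathlib
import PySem

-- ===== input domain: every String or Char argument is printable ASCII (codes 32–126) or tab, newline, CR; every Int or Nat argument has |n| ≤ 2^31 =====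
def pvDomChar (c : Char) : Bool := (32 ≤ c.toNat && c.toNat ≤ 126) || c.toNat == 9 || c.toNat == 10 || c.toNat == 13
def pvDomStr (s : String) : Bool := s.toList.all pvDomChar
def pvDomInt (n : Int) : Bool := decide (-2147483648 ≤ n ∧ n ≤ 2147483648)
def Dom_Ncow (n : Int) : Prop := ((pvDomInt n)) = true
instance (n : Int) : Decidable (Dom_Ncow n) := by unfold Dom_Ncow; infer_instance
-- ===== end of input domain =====

-- B replaces A's order-3 recurrence maintained in a rolling (a,b,c) triple by the
-- telescoped identity x[i] = 1 + (x[0] + ... + x[i-3]), maintained as a running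
-- prefix sum with a lag-3 read pointer (alternative decomposition; same cost).


-- ===== PORT A =====
-- for i in range(3,n): (a,b,c)=(b,c,c+a); result.append(c)   (the re-bound i is dead)
def Ncow (n : Int) : List Int :=
  ((PySem.List.pyRange 3 n 1).foldl
    (fun (st : (Int × Int × Int) × List Int) (_ : Int) =>
      let a := st.1.1; let b := st.1.2.1; let c := st.1.2.2
      ((b, c, c + a), st.2 ++ [c + a]))
    ((1, 1, 1), [1, 1, 1])).2

-- ===== PORT B =====
-- while len(result) < n: total += result[j]; j += 1; result.append(1 + total)
-- len starts at 3 and grows by 1 per iteration, so the loop runs exactly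
-- (n-3).toNat times; result[j] is read with pyGetD (j is always in range).
def NcowGo : Nat → List Int → Int → Int → List Int
  | 0, r, _, _ => r
  | k + 1, r, total, j =>
      let total' := total + PySem.List.pyGetD r j 0
      NcowGo k (r ++ [1 + total']) total' (j + 1)

def Ncow_alt (n : Int) : List Int := NcowGo (n - 3).toNat [1, 1, 1] 0 0

-- ===== PRECONDITION & SPEC =====
def Spec_Ncow (n : Int) (out : List Int) : Prop := out = Ncow_alt n
instance (n : Int) (out : List Int) : Decidable (Spec_Ncow n out) := by unfold Spec_Ncow; infer_instance

-- ===== CLAIM (what is proved, stated in full; the proofs are below) =====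
def Claim_equal_Ncow : Prop := ∀ (n : Int), Dom_Ncow n → Spec_Ncow n (Ncow n)

-- ===== LEMMAS AND PROOFS =====

-- the mathematical cow sequence, the common reference of both ports
def cow : Nat → Int
  | 0 => 1
  | 1 => 1
  | 2 => 1
  | m + 3 => cow (m + 2) + cow m

-- first k+3 terms of the sequence
def cowList (k : Nat) : List Int := (List.range (k + 3)).map cow

theorem cowList_succ (k : Nat) : cowList (k + 1) = cowList k ++ [cow (k + 3)] := by
  simp [cowList, List.range_succ]

-- telescoped identity: cow (k+2) = 1 + sum of the first k terms
theorem cow_eq_one_add_sum (k : Nat) :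
    cow (k + 2) = 1 + ∑ i ∈ Finset.range k, cow i := by
  induction k with
  | zero => simp [cow]
  | succ m ih =>
    have : cow (m + 3) = cow (m + 2) + cow m := by simp [cow]
    rw [Nat.succ_add, this, ih, Finset.sum_range_succ]
    ring

-- A's loop body ignores the loop variable, so the fold only depends on the list's length.
theorem foldl_const_body {α β : Type} (f : β → β) (l : List α) (s : β) :
    l.foldl (fun b _ => f b) s = f^[l.length] s := by
  induction l generalizing s with
  | nil => rfl
  | cons x xs ih => simp [List.foldl_cons, ih, Function.iterate_succ_apply]

-- A's invariant: after k iterations the triple holds cow k, cow (k+1), cow (k+2)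
-- and the list is the first k+3 terms.
theorem iterateA_eq (k : Nat) :
    (fun (st : (Int × Int × Int) × List Int) =>
        ((st.1.2.1, st.1.2.2, st.1.2.2 + st.1.1), st.2 ++ [st.1.2.2 + st.1.1]))^[k]
      ((1, 1, 1), [1, 1, 1])
      = ((cow k, cow (k + 1), cow (k + 2)), cowList k) := by
  induction k with
  | zero => simp [cow, cowList]; decide
  | succ m ih =>
    rw [Function.iterate_succ_apply', ih]
    have hc : cow (m + 3) = cow (m + 2) + cow m := by simp [cow]
    simp [cowList_succ, hc]

theorem cowList_getD (t : Nat) : (cowList t).getD t 0 = cow t := by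
  simp [cowList, List.getD]

-- B's invariant: from the first t+3 terms, prefix sum of the first t terms and
-- read pointer t, k more iterations yield the first t+k+3 terms.
theorem ncowGo_eq (k t : Nat) :
    NcowGo k (cowList t) (∑ i ∈ Finset.range t, cow i) (t : Int) = cowList (t + k) := by
  induction k generalizing t with
  | zero => simp [NcowGo]
  | succ m ih =>
    rw [NcowGo]
    have hget : PySem.List.pyGetD (cowList t) (t : Int) 0 = cow t := by
      rw [PySem.List.pyGetD_natCast, cowList_getD]
    have hsum : (∑ i ∈ Finset.range t, cow i) + cow t = ∑ i ∈ Finset.range (t + 1), cow i := by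
      rw [Finset.sum_range_succ]
    have hterm : (1 : Int) + ∑ i ∈ Finset.range (t + 1), cow i = cow (t + 3) := by
      have h := cow_eq_one_add_sum (t + 1)
      rw [show t + 1 + 2 = t + 3 by omega] at h
      omega
    simp only [hget, hsum, hterm]
    have hcast : ((t : Int) + 1) = ((t + 1 : Nat) : Int) := by push_cast; ring
    rw [← cowList_succ, hcast, ih]
    congr 1
    omega

-- ===== VERDICT (by name: the statement is the Claim_ definition above) =====
theorem Ncow_spec : Claim_equal_Ncow := by
  intro n _
  show Ncow n = Ncow_alt n
  unfold Ncow Ncow_alt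
  rw [foldl_const_body
    (fun (st : (Int × Int × Int) × List Int) =>
      ((st.1.2.1, st.1.2.2, st.1.2.2 + st.1.1), st.2 ++ [st.1.2.2 + st.1.1]))]
  rw [PySem.List.length_pyRange_one, iterateA_eq]
  have h0 : ([1, 1, 1] : List Int) = cowList 0 := by decide
  have : NcowGo (n - 3).toNat [1, 1, 1] 0 0
      = NcowGo (n - 3).toNat (cowList 0) (∑ i ∈ Finset.range 0, cow i) ((0 : Nat) : Int) := by
    rw [h0]; simp
  rw [this, ncowGo_eq]
  simp
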